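-- pv_equiv track=rewrite | github.com/cka304huk-m/my_teaching | 8/tasks/8.8.py | correct_string
-- ===== SOURCE A (Python) =====
-- def correct_string(string):
--     """Корректирую строку."""
--
--     correct = ''
--
--     # Разбиваю строку.
--     my_string = string.split()
--
--     my_string[0] = my_string[0].title()
--
--     # Перебираю длину списка минус 1 элемент,
--     # так как первое значение мы уже поменяли.
--     for i in range(len(my_string) - 1):
--         if my_string[i][-1] in '!?.':
--             my_string[i + 1] = my_string[i + 1].title()
--
--     for m in my_string:
--         correct += m + " "
--
--     return correct
-- ===== SOURCE B (Python) =====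
-- def correct_string(string):
--     """Корректирую строку."""
--     # Group the words into sentences (each group ends with its '!?.'-terminated word),
--     # then capitalize the head word of every sentence and join everything back.
--     words = string.split()
--     sentences, cur = [], []
--     for w in words:
--         cur.append(w)
--         if w[-1] in '!?.':
--             sentences.append(cur)
--             cur = []
--     if cur:
--         sentences.append(cur)
--     return ''.join(' '.join([s[0].title()] + s[1:]) + ' ' for s in sentences)
-- ===== Notes on version B (the rewrite author's own statement) =====
-- stated objective: alternative
-- what changed: A titles words[0] and then mutates the word list in place with an index loop that looks ahead (words[i+1]) from each word's last character, concatenating in a second pass; B instead groups the words into sentence segments (each ending with its '!?.'-terminated word), then titles the head word of every segment and joins the rendered segments.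
import Mathlib
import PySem

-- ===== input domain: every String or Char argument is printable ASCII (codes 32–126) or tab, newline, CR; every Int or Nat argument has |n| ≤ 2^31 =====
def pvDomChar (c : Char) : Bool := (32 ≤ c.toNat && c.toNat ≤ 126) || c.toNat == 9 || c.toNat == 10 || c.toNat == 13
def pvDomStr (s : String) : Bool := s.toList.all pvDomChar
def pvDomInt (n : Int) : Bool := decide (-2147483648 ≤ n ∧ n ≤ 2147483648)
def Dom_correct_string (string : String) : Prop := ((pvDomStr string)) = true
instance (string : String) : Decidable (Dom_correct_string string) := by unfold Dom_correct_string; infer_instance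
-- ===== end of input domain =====

-- B replaces A's forward index-lookahead over a mutated word list (plus a second concatenation
-- pass) by grouping the words into sentence segments and titling each segment's head word
-- (objective: alternative; same O(n) cost).

-- Shared helper: Python's str.title(), ported by hand (exact on the ASCII domain, where a
-- "cased" character is exactly a letter); both A and B call .title().
def titleChar (prev : Bool) (c : Char) : Char :=
  if PySem.Chars.isalpha c then
    (if prev then PySem.Chars.lowerChar c else PySem.Chars.upperChar c)
  else c

def pyTitleGo : Bool → List Char → List Char
  | _, [] => []
  | prev, c :: cs => titleChar prev c :: pyTitleGo (PySem.Chars.isalpha c) cs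

def pyTitle (w : List Char) : List Char := pyTitleGo false w

-- Shared helper: Python's `w[-1] in '!?.'` (single-char `in` = membership);
-- the `none` branch is Python's IndexError on an empty word, unreachable since split() words are nonempty.
def pends (w : List Char) : Bool :=
  match PySem.List.pyGet? w (-1) with
  | some c => c == '!' || c == '?' || c == '.'
  | none => false

-- ===== PORT A =====
-- the for-loop `for i in range(len(my_string) - 1)` with its in-place updates: fuel = remaining iterations
def aLoop : List (List Char) → Nat → Nat → List (List Char)
  | acc, _, 0 => acc
  | acc, i, fuel + 1 =>
    aLoop (if pends (acc.getD i []) then acc.set (i + 1) (pyTitle (acc.getD (i + 1) [])) else acc)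
      (i + 1) fuel

def correct_string (string : String) : String :=
  match PySem.Chars.split₀ string.toList with
  | [] => ""   -- Python raises IndexError at my_string[0]; excluded by Pre_
  | w0 :: rest =>
    let ms := pyTitle w0 :: rest
    let ms2 := aLoop ms 0 (ms.length - 1)
    String.ofList (ms2.foldl (fun correct m => correct ++ m ++ [' ']) [])

-- ===== PORT B =====
-- the loop body: cur.append(w); if w[-1] in '!?.': sentences.append(cur); cur = []
def bStep (st : List (List (List Char)) × List (List Char)) (w : List Char) :
    List (List (List Char)) × List (List Char) :=
  let cur := st.2 ++ [w]
  if pends w then (st.1 ++ [cur], []) else (st.1, cur)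

def correct_string_alt (string : String) : String :=
  let words := PySem.Chars.split₀ string.toList
  let st := words.foldl bStep ([], [])
  let sentences := if st.2 ≠ [] then st.1 ++ [st.2] else st.1
  -- ''.join(' '.join([s[0].title()] + s[1:]) + ' ' for s in sentences); every s is nonempty,
  -- so s[0] = s.headD []
  String.ofList
    ((sentences.map (fun s => PySem.Chars.join [' '] (pyTitle (s.headD []) :: s.tail) ++ [' '])).flatten)

-- ===== PRECONDITION & SPEC =====
-- Pre_ excludes exactly the empty/whitespace-only strings, on which A raises IndexError at words[0].
def Pre_correct_string (string : String) : Prop := PySem.Chars.split₀ string.toList ≠ []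
instance (string : String) : Decidable (Pre_correct_string string) := by
  unfold Pre_correct_string; infer_instance

def pvWitness_correct_string : String := "hi. there"

def Spec_correct_string (string : String) (out : String) : Prop := out = correct_string_alt string
instance (string : String) (out : String) : Decidable (Spec_correct_string string out) := by
  unfold Spec_correct_string; infer_instance

-- ===== CLAIM (what is proved, stated in full; the proofs are below) =====
def Claim_equal_correct_string : Prop := ∀ (string : String), Dom_correct_string string → Pre_correct_string string → Spec_correct_string string (correct_string string)

-- ===== LEMMAS AND PROOFS =====

-- Flag formulation used only by the proofs: word i is titled iff the previous word is
-- '!?.'-terminated; both ports are reduced to it.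
def bLoop : Bool → List (List Char) → List (List Char)
  | _, [] => []
  | prev, w :: ws => (if prev then pyTitle w else w) :: bLoop (pends w) ws

theorem pyGet?_neg_one {α : Type} (w : List α) : PySem.List.pyGet? w (-1) = w.getLast? := by
  cases w with
  | nil => rfl
  | cons a l =>
    simp [PySem.List.pyGet?, PySem.List.pyIdx?, List.getLast?_eq_getElem?]

def pchk (c : Char) : Bool := c == '!' || c == '?' || c == '.'

theorem pends_eq_pchk_getLast? (w : List Char) :
    pends w = (w.getLast?.map pchk).getD false := by
  unfold pends
  rw [pyGet?_neg_one]
  cases w.getLast? <;> rfl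

theorem pchk_of_letter (d : Char)
    (hd : 65 ≤ d.toNat ∧ d.toNat ≤ 90 ∨ 97 ≤ d.toNat ∧ d.toNat ≤ 122) : pchk d = false := by
  have h1 : d ≠ '!' := by intro he; subst he; simp at hd
  have h2 : d ≠ '?' := by intro he; subst he; simp at hd
  have h3 : d ≠ '.' := by intro he; subst he; simp at hd
  simp [pchk, h1, h2, h3]

theorem toNat_ofNat_small (n : Nat) (h : n < 55296) : (Char.ofNat n).toNat = n := by
  have hv : n.isValidChar := Or.inl h
  simp only [Char.ofNat, hv, dif_pos, Char.ofNatAux, Char.toNat]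
  simp

theorem islower_iff (c : Char) : PySem.Chars.islower c = true ↔ 97 ≤ c.toNat ∧ c.toNat ≤ 122 := by
  unfold PySem.Chars.islower
  simp only [Bool.and_eq_true, decide_eq_true_eq, Char.le_def]
  exact Iff.rfl

theorem isupper_iff (c : Char) : PySem.Chars.isupper c = true ↔ 65 ≤ c.toNat ∧ c.toNat ≤ 90 := by
  unfold PySem.Chars.isupper
  simp only [Bool.and_eq_true, decide_eq_true_eq, Char.le_def]
  exact Iff.rfl

-- titling a character never moves it into or out of '!?.': non-letters are fixed,
-- and the case-flipped version of a letter is again a letter.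
theorem pchk_titleChar (prev : Bool) (c : Char) : pchk (titleChar prev c) = pchk c := by
  unfold titleChar
  by_cases h : PySem.Chars.isalpha c = true
  · rw [if_pos h]
    have hn : 65 ≤ c.toNat ∧ c.toNat ≤ 90 ∨ 97 ≤ c.toNat ∧ c.toNat ≤ 122 := by
      unfold PySem.Chars.isalpha at h
      simp only [Bool.or_eq_true, islower_iff, isupper_iff] at h
      omega
    have hup : pchk (PySem.Chars.upperChar c) = false := by
      apply pchk_of_letter
      unfold PySem.Chars.upperChar
      split_ifs with hl
      · rw [islower_iff] at hl
        rw [toNat_ofNat_small _ (by omega)]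
        omega
      · exact hn
    have hlo : pchk (PySem.Chars.lowerChar c) = false := by
      apply pchk_of_letter
      unfold PySem.Chars.lowerChar
      split_ifs with hl
      · rw [isupper_iff] at hl
        rw [toNat_ofNat_small _ (by omega)]
        omega
      · exact hn
    rw [pchk_of_letter c hn]
    cases prev <;> simp [hup, hlo]
  · rw [if_neg h]

theorem pends_pyTitleGo (cs : List Char) : ∀ prev, pends (pyTitleGo prev cs) = pends cs := by
  induction cs with
  | nil => intro _; rfl
  | cons c cs ih =>
    intro prev
    cases cs with
    | nil =>
      simp only [pyTitleGo, pends_eq_pchk_getLast?, List.getLast?_singleton, Option.map_some,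
        Option.getD_some]
      exact pchk_titleChar prev c
    | cons c2 cs2 =>
      show pends (titleChar prev c :: pyTitleGo (PySem.Chars.isalpha c) (c2 :: cs2)) = _
      have h2 : pyTitleGo (PySem.Chars.isalpha c) (c2 :: cs2)
          = titleChar (PySem.Chars.isalpha c) c2 :: pyTitleGo (PySem.Chars.isalpha c2) cs2 := rfl
      calc pends (titleChar prev c :: pyTitleGo (PySem.Chars.isalpha c) (c2 :: cs2))
          = pends (pyTitleGo (PySem.Chars.isalpha c) (c2 :: cs2)) := by
            rw [pends_eq_pchk_getLast?, pends_eq_pchk_getLast?, h2, List.getLast?_cons_cons]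
        _ = pends (c2 :: cs2) := ih _
        _ = pends (c :: c2 :: cs2) := by
            rw [pends_eq_pchk_getLast?, pends_eq_pchk_getLast?, List.getLast?_cons_cons]

theorem pends_pyTitle (w : List Char) : pends (pyTitle w) = pends w := pends_pyTitleGo w false

-- A's index loop equals the flag formulation, generalized over an already-finalized prefix.
theorem aLoop_eq_bLoop (ws : List (List Char)) :
    ∀ (done : List (List Char)) (w : List Char),
      aLoop (done ++ w :: ws) done.length ws.length = done ++ w :: bLoop (pends w) ws := by
  induction ws with
  | nil => intro done w; rfl
  | cons x ws' ih =>
    intro done w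
    have hg1 : (done ++ w :: x :: ws').getD done.length [] = w := by
      simp [List.getD_eq_getElem?_getD]
    have hg2 : (done ++ w :: x :: ws').getD (done.length + 1) [] = x := by
      simp [List.getD_eq_getElem?_getD]
    have hset : (done ++ w :: x :: ws').set (done.length + 1) (pyTitle x) =
        done ++ w :: pyTitle x :: ws' := by
      simp
    show aLoop _ done.length (ws'.length + 1) = _
    unfold aLoop
    rw [hg1, hg2, hset]
    by_cases hp : pends w = true
    · rw [if_pos hp]
      have := ih (done ++ [w]) (pyTitle x)
      simp only [List.append_assoc, List.cons_append, List.nil_append,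
        List.length_append, List.length_cons, List.length_nil] at this ⊢
      rw [this, pends_pyTitle, bLoop]
      simp [hp]
    · rw [if_neg hp]
      replace hp : pends w = false := by simpa using hp
      have := ih (done ++ [w]) x
      simp only [List.append_assoc, List.cons_append, List.nil_append,
        List.length_append, List.length_cons, List.length_nil] at this ⊢
      rw [this, bLoop]
      simp [hp]

-- A's concatenation pass equals ' '.join plus a trailing space.
theorem fold_concat_eq_join (ws : List (List Char)) :
    ∀ acc, ws ≠ [] →
      ws.foldl (fun correct m => correct ++ m ++ [' ']) acc
        = acc ++ PySem.Chars.join [' '] ws ++ [' '] := by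
  induction ws with
  | nil => intro _ h; exact absurd rfl h
  | cons w rest ih =>
    intro acc _
    cases rest with
    | nil => simp [PySem.Chars.join_singleton, List.foldl]
    | cons r rs =>
      rw [List.foldl_cons, ih _ (by simp)]
      rw [PySem.Chars.join_cons_cons]
      simp

-- ---- B-side reduction to the flag formulation ----

-- 'join with spaces, trailing space' of a nonempty word list
def js (ws : List (List Char)) : List Char := PySem.Chars.join [' '] ws ++ [' ']

-- how B renders one sentence segment
def render (s : List (List Char)) : List Char :=
  PySem.Chars.join [' '] (pyTitle (s.headD []) :: s.tail) ++ [' ']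

def titleHead : List (List Char) → List (List Char)
  | [] => []
  | h :: t => pyTitle h :: t

theorem render_cons (h : List Char) (t : List (List Char)) :
    render (h :: t) = js (pyTitle h :: t) := rfl

-- B's final output expression, as a function of the loop's final state
def rendFin (st : List (List (List Char)) × List (List Char)) : List Char :=
  ((if st.2 ≠ [] then st.1 ++ [st.2] else st.1).map render).flatten

theorem bLoop_ne_nil (p : Bool) (ws : List (List Char)) (h : ws ≠ []) : bLoop p ws ≠ [] := by
  cases ws with
  | nil => exact absurd rfl h
  | cons w t => simp [bLoop]

theorem join_split (xs : List (List Char)) :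
    ∀ ys, xs ≠ [] → ys ≠ [] →
      PySem.Chars.join [' '] (xs ++ ys)
        = PySem.Chars.join [' '] xs ++ ' ' :: PySem.Chars.join [' '] ys := by
  induction xs with
  | nil => intro _ h _; exact absurd rfl h
  | cons x xs' ih =>
    intro ys _ hy
    cases xs' with
    | nil =>
      cases ys with
      | nil => exact absurd rfl hy
      | cons y ys' =>
        rw [PySem.Chars.join_singleton]
        show PySem.Chars.join [' '] (x :: y :: ys') = _
        rw [PySem.Chars.join_cons_cons]
        simp
    | cons x2 xs'' =>
      simp only [List.cons_append] at ih ⊢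
      rw [PySem.Chars.join_cons_cons, ih ys (by simp) hy, PySem.Chars.join_cons_cons]
      simp

theorem js_split (xs ys : List (List Char)) (hx : xs ≠ []) (hy : ys ≠ []) :
    js (xs ++ ys) = js xs ++ js ys := by
  unfold js
  rw [join_split xs ys hx hy]
  simp

-- the sentences accumulator is only appended to: pull an already-collected prefix out of the fold
theorem foldl_bStep_prefix (ws : List (List Char)) :
    ∀ (S : List (List (List Char))) (C : List (List Char)),
      ws.foldl bStep (S, C)
        = (S ++ (ws.foldl bStep ([], C)).1, (ws.foldl bStep ([], C)).2) := by
  induction ws with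
  | nil => intro S C; simp
  | cons w ws' ih =>
    intro S C
    show ws'.foldl bStep (bStep (S, C) w) = _
    by_cases hp : pends w = true
    · have hb : bStep (S, C) w = (S ++ [C ++ [w]], []) := by simp [bStep, hp]
      have hb0 : bStep (([] : List (List (List Char))), C) w = ([C ++ [w]], []) := by
        simp [bStep, hp]
      rw [hb]
      rw [ih (S ++ [C ++ [w]]) []]
      show _ = (S ++ (ws'.foldl bStep (bStep ([], C) w)).1, (ws'.foldl bStep (bStep ([], C) w)).2)
      rw [hb0, ih [C ++ [w]] []]
      simp
    · replace hp : pends w = false := by simpa using hp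
      have hb : bStep (S, C) w = (S, C ++ [w]) := by simp [bStep, hp]
      have hb0 : bStep (([] : List (List (List Char))), C) w = ([], C ++ [w]) := by
        simp [bStep, hp]
      rw [hb, ih S (C ++ [w])]
      show _ = (S ++ (ws'.foldl bStep (bStep ([], C) w)).1, (ws'.foldl bStep (bStep ([], C) w)).2)
      rw [hb0]

theorem rendFin_prefix (S X : List (List (List Char))) (C : List (List Char)) :
    rendFin (S ++ X, C) = (S.map render).flatten ++ rendFin (X, C) := by
  unfold rendFin
  by_cases hc : C ≠ [] <;> simp [hc, List.append_assoc]

-- Main invariant (T and L combined, strong induction on the word count):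
-- T: from a fresh state, B's rendered output is the flag form with the flag raised;
-- L: with a pending segment cur, it is cur (head titled) ++ the flag-off form of the rest.
theorem mainTL : ∀ (n : Nat) (ws : List (List Char)), ws.length ≤ n →
    ((ws ≠ [] → rendFin (ws.foldl bStep ([], [])) = js (bLoop true ws)) ∧
     (∀ cur, cur ≠ [] →
       rendFin (ws.foldl bStep ([], cur)) = js (titleHead cur ++ bLoop false ws))) := by
  intro n
  induction n with
  | zero =>
    intro ws hlen
    have hws : ws = [] := List.eq_nil_of_length_eq_zero (Nat.le_zero.mp hlen)
    subst hws
    refine ⟨fun h => absurd rfl h, fun cur hcur => ?_⟩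
    cases cur with
    | nil => exact absurd rfl hcur
    | cons h t => simp [rendFin, render_cons, titleHead, bLoop]
  | succ n ihn =>
    intro ws hlen
    cases ws with
    | nil =>
      refine ⟨fun h => absurd rfl h, fun cur hcur => ?_⟩
      cases cur with
      | nil => exact absurd rfl hcur
      | cons h t => simp [rendFin, render_cons, titleHead, bLoop]
    | cons w ws' =>
      have hlen' : ws'.length ≤ n := by simp at hlen; omega
      constructor
      · -- T part
        intro _
        show rendFin (ws'.foldl bStep (bStep ([], []) w)) = js (bLoop true (w :: ws'))
        have hrhs : bLoop true (w :: ws') = pyTitle w :: bLoop (pends w) ws' := rfl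
        by_cases hp : pends w = true
        · have hb : bStep (([] : List (List (List Char))), ([] : List (List Char))) w
              = ([[w]], []) := by simp [bStep, hp]
          rw [hb, hrhs, hp]
          cases ws' with
          | nil => simp [rendFin, render, bLoop, js, PySem.Chars.join_singleton]
          | cons y ys =>
            rw [foldl_bStep_prefix _ [[w]] [], rendFin_prefix, Prod.mk.eta]
            have hT := (ihn (y :: ys) hlen').1 (by simp)
            rw [show List.foldl bStep ([], []) (y :: ys) = (y :: ys).foldl bStep ([], []) from rfl,
              hT]
            have hsplit : pyTitle w :: bLoop true (y :: ys)
                = [pyTitle w] ++ bLoop true (y :: ys) := rfl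
            rw [hsplit, js_split [pyTitle w] _ (by simp) (bLoop_ne_nil true (y :: ys) (by simp))]
            simp [render_cons, js, PySem.Chars.join_singleton]
        · replace hp : pends w = false := by simpa using hp
          have hb : bStep (([] : List (List (List Char))), ([] : List (List Char))) w
              = ([], [w]) := by simp [bStep, hp]
          rw [hb]
          have hL := (ihn ws' hlen').2 [w] (by simp)
          rw [hL, hrhs, hp]
          simp [titleHead]
      · -- L part
        intro cur hcur
        show rendFin (ws'.foldl bStep (bStep ([], cur) w))
          = js (titleHead cur ++ bLoop false (w :: ws'))
        have hrhs : bLoop false (w :: ws') = w :: bLoop (pends w) ws' := rfl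
        obtain ⟨h, t, rfl⟩ : ∃ h t, cur = h :: t := by
          cases cur with
          | nil => exact absurd rfl hcur
          | cons h t => exact ⟨h, t, rfl⟩
        have hth : titleHead (h :: t) = pyTitle h :: t := rfl
        by_cases hp : pends w = true
        · have hb : bStep (([] : List (List (List Char))), h :: t) w
              = ([(h :: t) ++ [w]], []) := by simp [bStep, hp]
          rw [hb, hrhs, hp, hth]
          have hrend : (List.map render [(h :: t) ++ [w]]).flatten
              = js (pyTitle h :: (t ++ [w])) := by
            simp [render_cons]
          cases ws' with
          | nil =>
            show rendFin ([(h :: t) ++ [w]], []) = _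
            have hr : rendFin ([(h :: t) ++ [w]], []) =
                (List.map render [(h :: t) ++ [w]]).flatten := by simp [rendFin]
            rw [hr, hrend]
            exact congrArg js (by simp [bLoop])
          | cons y ys =>
            rw [foldl_bStep_prefix _ [(h :: t) ++ [w]] [], rendFin_prefix, Prod.mk.eta]
            have hT := (ihn (y :: ys) hlen').1 (by simp)
            rw [show List.foldl bStep ([], []) (y :: ys) = (y :: ys).foldl bStep ([], []) from rfl,
              hT, hrend]
            have hsplit : pyTitle h :: t ++ w :: bLoop true (y :: ys)
                = (pyTitle h :: (t ++ [w])) ++ bLoop true (y :: ys) := by simp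
            rw [hsplit, js_split _ _ (by simp) (bLoop_ne_nil true (y :: ys) (by simp))]
        · replace hp : pends w = false := by simpa using hp
          have hb : bStep (([] : List (List (List Char))), h :: t) w
              = ([], (h :: t) ++ [w]) := by simp [bStep, hp]
          rw [hb]
          have hL := (ihn ws' hlen').2 ((h :: t) ++ [w]) (by simp)
          rw [hL, hrhs, hth, hp]
          have : titleHead ((h :: t) ++ [w]) = pyTitle h :: (t ++ [w]) := rfl
          rw [this]
          exact congrArg js (by simp)

-- ===== VERDICT (by name: the statement is the Claim_ definition above) =====
theorem correct_string_spec : Claim_equal_correct_string := by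
  intro string _hdom hpre
  unfold Spec_correct_string correct_string correct_string_alt
  unfold Pre_correct_string at hpre
  cases h : PySem.Chars.split₀ string.toList with
  | nil => exact absurd h hpre
  | cons w0 rest =>
    simp only
    -- A side
    have hlen : (pyTitle w0 :: rest).length - 1 = rest.length := by simp
    rw [hlen]
    have hA := aLoop_eq_bLoop rest [] (pyTitle w0)
    simp only [List.nil_append, List.length_nil] at hA
    rw [hA, pends_pyTitle]
    rw [fold_concat_eq_join _ [] (by simp)]
    -- B side
    have hB := (mainTL (w0 :: rest).length (w0 :: rest) le_rfl).1 (by simp)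
    have hBL : bLoop true (w0 :: rest) = pyTitle w0 :: bLoop (pends w0) rest := rfl
    rw [hBL] at hB
    have hfin : rendFin ((w0 :: rest).foldl bStep ([], []))
        = ((if ((w0 :: rest).foldl bStep ([], [])).2 ≠ [] then
              ((w0 :: rest).foldl bStep ([], [])).1 ++ [((w0 :: rest).foldl bStep ([], [])).2]
            else ((w0 :: rest).foldl bStep ([], [])).1).map render).flatten := rfl
    rw [hfin] at hB
    rw [show render = (fun s : List (List Char) =>
        PySem.Chars.join [' '] (pyTitle (s.headD []) :: s.tail) ++ [' ']) from rfl] at hB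
    rw [hB]
    simp [js]
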